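-- pv_equiv track=rewrite | github.com/egimenos/cycling-fantasy-analyzer-v2 | ml/src/domain/classic_taxonomy.py | get_feeders_for_race
-- ===== SOURCE A (Python) =====
-- SLUG_ALIASES: dict[str, str] = {
--     "e3-harelbeke": "e3-saxo-classic",
--     "san-sebastian": "clasica-san-sebastian",
-- }
--
-- PIPELINE_GROUPS: dict[str, list[dict]] = {
--     "flemish_spring": [
--         {"slug": "omloop-het-nieuwsblad", "order": 1, "role": "feeder"},
--         {"slug": "kuurne-brussel-kuurne", "order": 2, "role": "feeder"},
--         {"slug": "e3-saxo-classic", "order": 3, "role": "feeder"},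
--         {"slug": "gent-wevelgem", "order": 4, "role": "feeder"},
--         {"slug": "dwars-door-vlaanderen", "order": 5, "role": "feeder"},
--         {"slug": "ronde-van-vlaanderen", "order": 6, "role": "target"},
--     ],
--     "cobbled_spring": [
--         {"slug": "ronde-van-vlaanderen", "order": 1, "role": "feeder"},
--         {"slug": "paris-roubaix", "order": 2, "role": "target"},
--     ],
--     "ardennes_spring": [
--         {"slug": "amstel-gold-race", "order": 1, "role": "feeder"},
--         {"slug": "la-fleche-wallonne", "order": 2, "role": "feeder"},
--         {"slug": "liege-bastogne-liege", "order": 3, "role": "target"},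
--     ],
--     "italian_spring": [
--         {"slug": "strade-bianche", "order": 1, "role": "feeder"},
--         {"slug": "milano-sanremo", "order": 2, "role": "target"},
--     ],
--     "italian_autumn": [
--         {"slug": "giro-dell-emilia", "order": 1, "role": "feeder"},
--         {"slug": "gran-piemonte", "order": 2, "role": "feeder"},
--         {"slug": "il-lombardia", "order": 3, "role": "target"},
--     ],
-- }
--
-- def resolve_slug(race_slug: str) -> str:
--     """Resolve aliases to canonical slug."""
--     return SLUG_ALIASES.get(race_slug, race_slug)
--
-- def get_feeders_for_race(race_slug: str) -> list[str]:
--     """Get feeder race slugs that precede this race in any pipeline group.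
--
--     Returns canonical slugs (aliases resolved).
--     """
--     slug = resolve_slug(race_slug)
--     feeders: set[str] = set()
--     for group in PIPELINE_GROUPS.values():
--         slugs_in_group = [r["slug"] for r in group]
--         if slug in slugs_in_group:
--             my_order = next(r["order"] for r in group if r["slug"] == slug)
--             feeders.update(r["slug"] for r in group if r["order"] < my_order)
--     return sorted(feeders)
-- ===== SOURCE B (Python) =====
-- SLUG_ALIASES: dict[str, str] = {
--     "e3-harelbeke": "e3-saxo-classic",
--     "san-sebastian": "clasica-san-sebastian",
-- }
--
-- PIPELINE_GROUPS: dict[str, list[dict]] = {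
--     "flemish_spring": [
--         {"slug": "omloop-het-nieuwsblad", "order": 1, "role": "feeder"},
--         {"slug": "kuurne-brussel-kuurne", "order": 2, "role": "feeder"},
--         {"slug": "e3-saxo-classic", "order": 3, "role": "feeder"},
--         {"slug": "gent-wevelgem", "order": 4, "role": "feeder"},
--         {"slug": "dwars-door-vlaanderen", "order": 5, "role": "feeder"},
--         {"slug": "ronde-van-vlaanderen", "order": 6, "role": "target"},
--     ],
--     "cobbled_spring": [
--         {"slug": "ronde-van-vlaanderen", "order": 1, "role": "feeder"},
--         {"slug": "paris-roubaix", "order": 2, "role": "target"},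
--     ],
--     "ardennes_spring": [
--         {"slug": "amstel-gold-race", "order": 1, "role": "feeder"},
--         {"slug": "la-fleche-wallonne", "order": 2, "role": "feeder"},
--         {"slug": "liege-bastogne-liege", "order": 3, "role": "target"},
--     ],
--     "italian_spring": [
--         {"slug": "strade-bianche", "order": 1, "role": "feeder"},
--         {"slug": "milano-sanremo", "order": 2, "role": "target"},
--     ],
--     "italian_autumn": [
--         {"slug": "giro-dell-emilia", "order": 1, "role": "feeder"},
--         {"slug": "gran-piemonte", "order": 2, "role": "feeder"},
--         {"slug": "il-lombardia", "order": 3, "role": "target"},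
--     ],
-- }
--
-- def resolve_slug(race_slug: str) -> str:
--     """Resolve aliases to canonical slug."""
--     return SLUG_ALIASES.get(race_slug, race_slug)
--
-- # Precomputed once at module load: canonical slug -> sorted list of all
-- # feeders preceding it in any pipeline group it appears in.
-- _FEEDERS_BY_SLUG: dict[str, list[str]] = {}
--
-- def _build_index() -> None:
--     acc: dict[str, set[str]] = {}
--     for group in PIPELINE_GROUPS.values():
--         for entry in group:
--             bucket = acc.setdefault(entry["slug"], set())
--             for r in group:
--                 if r["order"] < entry["order"]:
--                     bucket.add(r["slug"])
--     for slug, feeders in acc.items():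
--         _FEEDERS_BY_SLUG[slug] = sorted(feeders)
--
-- _build_index()
--
-- def get_feeders_for_race(race_slug: str) -> list[str]:
--     """Get feeder race slugs that precede this race in any pipeline group."""
--     return list(_FEEDERS_BY_SLUG.get(resolve_slug(race_slug), []))
-- ===== Notes on version B (the rewrite author's own statement) =====
-- stated objective: faster
-- what changed: B builds, once at module load, a dict mapping every canonical slug to its sorted feeder list (merging contributions across all groups the slug appears in), so each call is a single alias resolution plus one dict lookup instead of rescanning every pipeline group.
import Mathlib
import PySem

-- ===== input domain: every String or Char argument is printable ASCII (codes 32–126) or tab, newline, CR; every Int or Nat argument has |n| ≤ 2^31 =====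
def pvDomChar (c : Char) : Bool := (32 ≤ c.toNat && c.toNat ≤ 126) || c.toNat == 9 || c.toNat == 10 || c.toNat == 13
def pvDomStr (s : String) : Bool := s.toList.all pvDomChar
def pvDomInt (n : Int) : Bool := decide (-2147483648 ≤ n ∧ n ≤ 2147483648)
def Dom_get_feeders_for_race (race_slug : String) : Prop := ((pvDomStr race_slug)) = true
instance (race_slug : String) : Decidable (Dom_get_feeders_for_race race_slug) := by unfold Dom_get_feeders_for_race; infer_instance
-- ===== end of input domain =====

-- B precomputes, once, a dict mapping each canonical slug to its sorted feeder list,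
-- so the per-call work is a single alias resolution plus one dict lookup (objective: idiomatic/faster per call).

-- ===== PORT A =====
-- module constants shared by both Pythons
def pvAliases : PySem.Dict String String :=
  PySem.Dict.ofList [("e3-harelbeke", "e3-saxo-classic"), ("san-sebastian", "clasica-san-sebastian")]

-- each pipeline entry is (slug, order, role)
def pvGroups : List (List (String × Int × String)) :=
  [ [("omloop-het-nieuwsblad", 1, "feeder"), ("kuurne-brussel-kuurne", 2, "feeder"),
     ("e3-saxo-classic", 3, "feeder"), ("gent-wevelgem", 4, "feeder"),
     ("dwars-door-vlaanderen", 5, "feeder"), ("ronde-van-vlaanderen", 6, "target")],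
    [("ronde-van-vlaanderen", 1, "feeder"), ("paris-roubaix", 2, "target")],
    [("amstel-gold-race", 1, "feeder"), ("la-fleche-wallonne", 2, "feeder"),
     ("liege-bastogne-liege", 3, "target")],
    [("strade-bianche", 1, "feeder"), ("milano-sanremo", 2, "target")],
    [("giro-dell-emilia", 1, "feeder"), ("gran-piemonte", 2, "feeder"),
     ("il-lombardia", 3, "target")] ]

def pvResolveSlug (race_slug : String) : String := PySem.Dict.getD pvAliases race_slug race_slug

def get_feeders_for_race (race_slug : String) : List String :=
  let slug := pvResolveSlug race_slug
  let feeders : PySem.Set String :=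
    pvGroups.foldl (fun feeders group =>
      let slugs_in_group : List String := group.map (fun r => r.1)
      if slug ∈ slugs_in_group then
        -- next(r["order"] for r in group if r["slug"] == slug): first match; the guard above
        -- makes a match certain, so the .getD 0 default is never reached
        let my_order : Int := (((group.filter (fun r => r.1 == slug)).head?).map (fun r => r.2.1)).getD 0
        PySem.Set.update feeders ((group.filter (fun r => r.2.1 < my_order)).map (fun r => r.1))
      else feeders) PySem.Set.empty
  PySem.List.sorted feeders (fun x => x) false

-- ===== PORT B =====
-- _build_index: for every entry of every group, merge into its bucket the slugs with smaller order
def pvFeederSets : PySem.Dict String (PySem.Set String) :=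
  pvGroups.foldl (fun acc group =>
    group.foldl (fun acc entry =>
      let bucket := PySem.Dict.getD acc entry.1 PySem.Set.empty
      let bucket := group.foldl (fun b r => if r.2.1 < entry.2.1 then PySem.Set.add b r.1 else b) bucket
      PySem.Dict.insert acc entry.1 bucket) acc) PySem.Dict.empty

-- _FEEDERS_BY_SLUG: each bucket sorted, built from acc.items() in order (keys are unique)
def pvFeedersBySlug : PySem.Dict String (List String) :=
  PySem.Dict.mk (pvFeederSets.items.map (fun kv => (kv.1, PySem.List.sorted kv.2 (fun x => x) false)))

def get_feeders_for_race_alt (race_slug : String) : List String :=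
  PySem.Dict.getD pvFeedersBySlug (pvResolveSlug race_slug) []

-- ===== PRECONDITION & SPEC =====
def Spec_get_feeders_for_race (race_slug : String) (out : List String) : Prop := out = get_feeders_for_race_alt race_slug
instance (race_slug : String) (out : List String) : Decidable (Spec_get_feeders_for_race race_slug out) := by unfold Spec_get_feeders_for_race; infer_instance

-- ===== CLAIM (what is proved, stated in full; the proofs are below) =====
def Claim_equal_get_feeders_for_race : Prop := ∀ (race_slug : String), Dom_get_feeders_for_race race_slug → Spec_get_feeders_for_race race_slug (get_feeders_for_race race_slug)

-- ===== LEMMAS AND PROOFS =====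

-- every slug appearing in any pipeline group (and hence any key of pvFeedersBySlug)
def pvKnownSlugs : List String :=
  ["omloop-het-nieuwsblad", "kuurne-brussel-kuurne", "e3-saxo-classic", "gent-wevelgem",
   "dwars-door-vlaanderen", "ronde-van-vlaanderen", "paris-roubaix", "amstel-gold-race",
   "la-fleche-wallonne", "liege-bastogne-liege", "strade-bianche", "milano-sanremo",
   "giro-dell-emilia", "gran-piemonte", "il-lombardia"]



-- core equality, as a function of the resolved slug
lemma pv_core_eq (s : String) :
    PySem.List.sorted
      (pvGroups.foldl (fun feeders group =>
        let slugs_in_group : List String := group.map (fun r => r.1)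
        if s ∈ slugs_in_group then
          let my_order : Int := (((group.filter (fun r => r.1 == s)).head?).map (fun r => r.2.1)).getD 0
          PySem.Set.update feeders ((group.filter (fun r => r.2.1 < my_order)).map (fun r => r.1))
        else feeders) PySem.Set.empty)
      (fun x => x) false
    = PySem.Dict.getD pvFeedersBySlug s [] := by
  by_cases h : s ∈ pvKnownSlugs
  · simp only [pvKnownSlugs, List.mem_cons, List.not_mem_nil, or_false] at h
    rcases h with h | h | h | h | h | h | h | h | h | h | h | h | h | h | h <;> subst h <;> rfl
  · simp only [pvKnownSlugs, List.mem_cons, List.not_mem_nil, or_false, not_or] at h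
    obtain ⟨h1, h2, h3, h4, h5, h6, h7, h8, h9, h10, h11, h12, h13, h14, h15⟩ := h
    have hk : pvFeedersBySlug.keys = pvKnownSlugs := by rfl
    have hc : pvFeedersBySlug.contains s = false := by
      rw [PySem.Dict.contains_eq_decide_mem_keys, hk]
      simp [pvKnownSlugs, h1, h2, h3, h4, h5, h6, h7, h8, h9, h10, h11, h12, h13, h14, h15]
    rw [PySem.Dict.getD_of_not_contains pvFeedersBySlug [] hc]
    simp [pvGroups, h1, h2, h3, h4, h5, h6, h7, h8, h9, h10, h11, h12, h13, h14, h15]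
    rfl

-- ===== VERDICT (by name: the statement is the Claim_ definition above) =====
theorem get_feeders_for_race_spec : Claim_equal_get_feeders_for_race := by
  intro race_slug _
  unfold Spec_get_feeders_for_race get_feeders_for_race get_feeders_for_race_alt
  exact pv_core_eq (pvResolveSlug race_slug)
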